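-- pv_equiv track=rewrite | github.com/vivelakorea/coding-test | baekjoon/p2231.py | partition_sum
-- ===== SOURCE A (Python) =====
-- def partition_sum(n):
--     tmp = n
--     res = 0
--     while n:
--         res += n % 10
--         n -= n % 10
--         n //= 10
--     res += tmp
--     return res
-- ===== SOURCE B (Python) =====
-- def partition_sum(n):
--     return n + sum(int(c) for c in str(n))
-- ===== Notes on version B (the rewrite author's own statement) =====
-- stated objective: idiomatic
-- what changed: B computes the digit sum by summing the characters of the decimal string representation in one expression instead of A's arithmetic peeling loop with explicit %/-//= state updates; Pre_ excludes negative n, where A loops forever (and B raises ValueError).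
import Mathlib
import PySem

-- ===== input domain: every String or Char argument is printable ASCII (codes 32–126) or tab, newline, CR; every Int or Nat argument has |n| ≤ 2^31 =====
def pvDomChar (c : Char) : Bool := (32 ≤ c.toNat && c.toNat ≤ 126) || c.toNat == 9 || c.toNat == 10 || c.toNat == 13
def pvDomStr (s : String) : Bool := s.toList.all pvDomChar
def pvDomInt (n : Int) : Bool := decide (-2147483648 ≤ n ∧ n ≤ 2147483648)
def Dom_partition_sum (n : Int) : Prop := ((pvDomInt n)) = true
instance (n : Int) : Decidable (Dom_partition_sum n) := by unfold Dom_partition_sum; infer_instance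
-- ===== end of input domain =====

-- B computes the digit sum by summing the characters of str(n) in one expression,
-- instead of A's arithmetic peeling loop; equal on all admitted (non-negative) inputs.


-- ===== PORT A =====
-- the 'while n:' loop, with a fuel bound (n.toNat + 1 steps always suffice on the admitted inputs;
-- the guard makes the function total: on negative input the Python loop diverges, excluded by Pre_).
def pvLoopA (fuel : Nat) (n res : Int) : Int :=
  match fuel with
  | 0 => res
  | f + 1 =>
    if n ≤ 0 then res
    else pvLoopA f (PySem.Int.floordiv (n - PySem.Int.mod n 10) 10) (res + PySem.Int.mod n 10)

def partition_sum (n : Int) : Int :=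
  pvLoopA (n.toNat + 1) n 0 + n    -- tmp = n; res accumulated by the loop; res += tmp; return res

-- ===== PORT B =====
-- Source B: return n + sum(int(c) for c in str(n)).  str(n) is PySem.Int.toChars n; on the
-- admitted inputs (n ≥ 0) every character is a decimal digit, so int(c) = code(c) - 48 (exact there).
def partition_sum_alt (n : Int) : Int :=
  n + ((PySem.Int.toChars n).map (fun c => (c.toNat : Int) - 48)).sum

-- ===== PRECONDITION & SPEC =====
-- Pre_ excludes n < 0: there the Python A never returns (infinite loop).
def Pre_partition_sum (n : Int) : Prop := 0 ≤ n
instance (n : Int) : Decidable (Pre_partition_sum n) := by unfold Pre_partition_sum; infer_instance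
def pvWitness_partition_sum : Int := 199

def Spec_partition_sum (n : Int) (out : Int) : Prop := out = partition_sum_alt n
instance (n : Int) (out : Int) : Decidable (Spec_partition_sum n out) := by unfold Spec_partition_sum; infer_instance

-- ===== CLAIM (what is proved, stated in full; the proofs are below) =====
def Claim_equal_partition_sum : Prop := ∀ (n : Int), Dom_partition_sum n → Pre_partition_sum n → Spec_partition_sum n (partition_sum n)

-- ===== LEMMAS AND PROOFS =====

/-- arithmetic digit sum of a natural number (common yardstick for both ports) -/
def pvDigitSum (m : Nat) : Nat :=
  if m = 0 then 0 else m % 10 + pvDigitSum (m / 10)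

lemma pvDigitChar_toNat (d : Nat) (h : d < 10) : (Nat.digitChar d).toNat = 48 + d := by
  interval_cases d <;> rfl

lemma pvToDigitsCore_sum (fuel : Nat) : ∀ (m : Nat) (acc : List Char), m < fuel →
    ((Nat.toDigitsCore 10 fuel m acc).map (fun c => (c.toNat : Int) - 48)).sum
      = (pvDigitSum m : Int) + ((acc.map (fun c => (c.toNat : Int) - 48)).sum) := by
  induction fuel with
  | zero => intro m acc h; omega
  | succ f ih =>
    intro m acc h
    rw [Nat.toDigitsCore]
    by_cases hz : m / 10 = 0
    · rw [if_pos hz, List.map_cons, List.sum_cons,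
          pvDigitChar_toNat (m % 10) (Nat.mod_lt _ (by omega))]
      conv_rhs => rw [pvDigitSum]
      by_cases hm0 : m = 0
      · subst hm0
        norm_num
      · rw [if_neg hm0, pvDigitSum, if_pos hz]
        push_cast
        ring
    · rw [if_neg hz, ih (m / 10) _ (by omega), List.map_cons, List.sum_cons,
          pvDigitChar_toNat (m % 10) (Nat.mod_lt _ (by omega))]
      conv_rhs => rw [pvDigitSum]
      rw [if_neg (show m ≠ 0 by omega)]
      push_cast
      ring

lemma pvCharSum (m : Nat) :
    ((Nat.toDigits 10 m).map (fun c => (c.toNat : Int) - 48)).sum = (pvDigitSum m : Int) := by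
  have := pvToDigitsCore_sum (m + 1) m [] (by omega)
  simpa [Nat.toDigits] using this

lemma pvLoopA_eq : ∀ (fuel : Nat) (n res : Int), 0 ≤ n → n.toNat < fuel →
    pvLoopA fuel n res = res + (pvDigitSum n.toNat : Int) := by
  intro fuel
  induction fuel with
  | zero => intro n res hn hk; omega
  | succ f ih =>
    intro n res hn hk
    rw [pvLoopA]
    by_cases h0 : n ≤ 0
    · have : n = 0 := by omega
      subst this
      rw [if_pos (by omega : (0:Int) ≤ 0), pvDigitSum]
      simp
    · rw [if_neg h0]
      have hm1 : PySem.Int.mod n 10 = n % 10 := PySem.Int.mod_eq_emod_of_pos (by omega)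
      have hd : PySem.Int.floordiv (n - PySem.Int.mod n 10) 10 = (n - PySem.Int.mod n 10) / 10 :=
        PySem.Int.floordiv_eq_ediv_of_pos (by omega)
      have h2 : n - n % 10 = 10 * (n / 10) := by omega
      have h3 : (10 * (n / 10)) / 10 = n / 10 := by omega
      have h5 : 0 ≤ n / 10 := by omega
      have h4 : n / 10 < n := by omega
      rw [hd, hm1, h2, h3]
      rw [ih (n / 10) _ h5 (by omega)]
      have hdig : pvDigitSum n.toNat = n.toNat % 10 + pvDigitSum (n.toNat / 10) := by
        rw [pvDigitSum, if_neg (by omega)]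
      have hmod : (n % 10 : Int) = (n.toNat % 10 : Nat) := by omega
      have hdiv : (n / 10).toNat = n.toNat / 10 := by omega
      rw [hdiv, hmod, hdig]
      push_cast
      ring

-- ===== VERDICT (by name: the statement is the Claim_ definition above) =====
theorem partition_sum_spec : Claim_equal_partition_sum := by
  intro n _hdom hpre
  have hpre' : (0:Int) ≤ n := hpre
  unfold Spec_partition_sum partition_sum partition_sum_alt
  rw [pvLoopA_eq (n.toNat + 1) n 0 hpre' (by omega)]
  unfold PySem.Int.toChars
  rw [if_neg (by omega)]
  rw [pvCharSum n.toNat]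
  ring
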